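-- pv_equiv track=rewrite | github.com/mastergreg/aoc-2022 | day9.py | calculate_move
-- ===== SOURCE A (Python) =====
-- def calculate_move(point, instruction):
--     moves = []
--     command, repeats = instruction
--     for _ in range(repeats):
--         x, y = point
--         match command:
--             case "R":
--                 point = (x + 1, y)
--                 moves.append(point)
--             case "L":
--                 point = (x - 1, y)
--                 moves.append(point)
--             case "U":
--                 point = (x, y + 1)
--                 moves.append(point)
--             case "D":
--                 point = (x, y - 1)
--                 moves.append(point)
--     return moves
-- ===== SOURCE B (Python) =====
-- DELTAS = {"R": (1, 0), "L": (-1, 0), "U": (0, 1), "D": (0, -1)}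
--
--
-- def calculate_move(point, instruction):
--     command, repeats = instruction
--     if command not in DELTAS:
--         return []
--     dx, dy = DELTAS[command]
--     x, y = point
--     return [(x + dx * i, y + dy * i) for i in range(1, repeats + 1)]
-- ===== Notes on version B (the rewrite author's own statement) =====
-- stated objective: simpler
-- what changed: Replaces A's loop that repeatedly mutates a running point with a dict lookup of a single (dx,dy) delta and a closed-form comprehension computing each point directly from its index.
import Mathlib
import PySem

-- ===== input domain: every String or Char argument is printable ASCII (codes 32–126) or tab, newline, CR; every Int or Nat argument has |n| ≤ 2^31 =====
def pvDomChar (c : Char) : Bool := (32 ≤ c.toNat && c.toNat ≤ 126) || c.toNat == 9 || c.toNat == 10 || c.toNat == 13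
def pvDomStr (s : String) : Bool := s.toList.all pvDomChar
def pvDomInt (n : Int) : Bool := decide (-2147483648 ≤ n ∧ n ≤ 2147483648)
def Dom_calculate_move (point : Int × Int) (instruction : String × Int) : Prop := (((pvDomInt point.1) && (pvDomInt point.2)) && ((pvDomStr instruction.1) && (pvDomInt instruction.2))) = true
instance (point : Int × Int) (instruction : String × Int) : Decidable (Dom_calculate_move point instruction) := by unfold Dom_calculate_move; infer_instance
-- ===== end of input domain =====

-- B replaces A's loop that mutates a running point with a dict lookup of a single delta
-- and a closed-form comprehension computing each point from its index (objective: simpler).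
-- ===== PORT A =====
def calculate_move (point : Int × Int) (instruction : String × Int) : List (Int × Int) :=
  let command := instruction.1
  let repeats := instruction.2
  (((PySem.List.pyRange 0 repeats 1).foldl
    (fun (st : (Int × Int) × List (Int × Int)) (_ : Int) =>
      let x := st.1.1
      let y := st.1.2
      if command = "R" then ((x + 1, y), st.2 ++ [(x + 1, y)])
      else if command = "L" then ((x - 1, y), st.2 ++ [(x - 1, y)])
      else if command = "U" then ((x, y + 1), st.2 ++ [(x, y + 1)])
      else if command = "D" then ((x, y - 1), st.2 ++ [(x, y - 1)])
      else (st.1, st.2))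
    (point, []))).2

-- ===== PORT B =====
def pvDeltas : PySem.Dict String (Int × Int) :=
  PySem.Dict.ofList [("R", (1, 0)), ("L", (-1, 0)), ("U", (0, 1)), ("D", (0, -1))]

def calculate_move_alt (point : Int × Int) (instruction : String × Int) : List (Int × Int) :=
  match PySem.Dict.get? pvDeltas instruction.1 with
  | none => []
  | some d =>
    (PySem.List.pyRange 1 (instruction.2 + 1) 1).map
      (fun i => (point.1 + d.1 * i, point.2 + d.2 * i))

-- ===== PRECONDITION & SPEC =====
def Spec_calculate_move (point : Int × Int) (instruction : String × Int) (out : List (Int × Int)) : Prop := out = calculate_move_alt point instruction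
instance (point : Int × Int) (instruction : String × Int) (out : List (Int × Int)) : Decidable (Spec_calculate_move point instruction out) := by unfold Spec_calculate_move; infer_instance

-- ===== CLAIM (what is proved, stated in full; the proofs are below) =====
def Claim_equal_calculate_move : Prop := ∀ (point : Int × Int) (instruction : String × Int), Dom_calculate_move point instruction → Spec_calculate_move point instruction (calculate_move point instruction)

-- ===== LEMMAS AND PROOFS =====

-- ===== VERDICT (by name: the statement is the Claim_ definition above) =====
-- step function of A's loop, specialised to a fixed delta (d.1, d.2)
def pvStep (d : Int × Int) (st : (Int × Int) × List (Int × Int)) (_ : Int) :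
    (Int × Int) × List (Int × Int) :=
  ((st.1.1 + d.1, st.1.2 + d.2), st.2 ++ [(st.1.1 + d.1, st.1.2 + d.2)])

lemma pyRange_nil (a b : Int) (h : b ≤ a) : PySem.List.pyRange a b = [] := by
  simp [PySem.List.pyRange]; omega

lemma pyRange_map_eq {α : Type} (n : Nat) (f : Int → α) :
    (PySem.List.pyRange 1 ((n : Int) + 1)).map f
      = (List.range n).map (fun (k : Nat) => f ((k : Int) + 1)) := by
  induction n with
  | zero => simp [pyRange_nil 1 1 le_rfl]
  | succ m ih =>
      rw [show ((m + 1 : Nat) : Int) + 1 = ((m : Int) + 1) + 1 by push_cast; ring,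
        PySem.List.pyRange_one_succ_right (by omega), List.range_succ]
      simp [ih]

lemma foldl_pvStep (d : Int × Int) (l : List Int) (x y : Int) (acc : List (Int × Int)) :
    (l.foldl (pvStep d) ((x, y), acc)).2
      = acc ++ (List.range l.length).map
          (fun (k : Nat) => (x + d.1 * ((k : Int) + 1), y + d.2 * ((k : Int) + 1))) := by
  induction l generalizing x y acc with
  | nil => simp
  | cons a t ih =>
      rw [List.foldl_cons]
      show ((t.foldl (pvStep d) ((x + d.1, y + d.2), acc ++ [(x + d.1, y + d.2)]))).2 = _
      rw [ih, List.length_cons, List.range_succ_eq_map]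
      simp only [List.map_cons, List.map_map, List.append_assoc, List.singleton_append,
        Nat.cast_zero, zero_add, mul_one]
      congr 2
      apply List.map_congr_left
      intro k _
      simp only [Function.comp_apply, Prod.mk.injEq, Nat.succ_eq_add_one]
      push_cast
      constructor <;> ring

lemma calc_eq_dir (point : Int × Int) (c : String) (r : Int) (d : Int × Int)
    (hc : PySem.Dict.get? pvDeltas c = some d)
    (hstep : ∀ st i, (fun (st : (Int × Int) × List (Int × Int)) (_ : Int) =>
      let x := st.1.1
      let y := st.1.2
      if c = "R" then ((x + 1, y), st.2 ++ [(x + 1, y)])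
      else if c = "L" then ((x - 1, y), st.2 ++ [(x - 1, y)])
      else if c = "U" then ((x, y + 1), st.2 ++ [(x, y + 1)])
      else if c = "D" then ((x, y - 1), st.2 ++ [(x, y - 1)])
      else (st.1, st.2)) st i = pvStep d st i) :
    calculate_move point (c, r) = calculate_move_alt point (c, r) := by
  rcases point with ⟨x, y⟩
  simp only [calculate_move, calculate_move_alt, hc]
  by_cases hr : r ≤ 0
  · rw [pyRange_nil 0 r hr, pyRange_nil 1 (r + 1) (by omega)]
    simp
  · obtain ⟨n, rfl⟩ : ∃ n : Nat, r = (n : Int) :=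
      ⟨r.toNat, (Int.toNat_of_nonneg (by omega)).symm⟩
    rw [funext fun st => funext fun i => hstep st i, PySem.List.pyRange_zero_natCast,
      List.foldl_map, pyRange_map_eq]
    have h := foldl_pvStep d ((List.range n).map (fun k => ((k : Nat) : Int))) x y []
    rw [List.foldl_map] at h
    simpa using h

lemma get_none_of_unknown (c : String) (hR : ¬c = "R") (hL : ¬c = "L")
    (hU : ¬c = "U") (hD : ¬c = "D") : PySem.Dict.get? pvDeltas c = none := by
  have hk : PySem.Dict.keys pvDeltas = ["R", "L", "U", "D"] := by decide
  rw [PySem.Dict.get?_eq_none_iff_not_mem_keys, hk]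
  simp [hR, hL, hU, hD]

-- ===== VERDICT (by name: the statement is the Claim_ definition above) =====
theorem calculate_move_spec : Claim_equal_calculate_move := by
  intro point instruction _
  unfold Spec_calculate_move
  rcases instruction with ⟨c, r⟩
  by_cases hR : c = "R"
  · subst hR; exact calc_eq_dir point "R" r (1, 0) (by decide) (fun st i => by simp [pvStep, sub_eq_add_neg])
  by_cases hL : c = "L"
  · subst hL; exact calc_eq_dir point "L" r (-1, 0) (by decide) (fun st i => by simp [pvStep, sub_eq_add_neg])
  by_cases hU : c = "U"
  · subst hU; exact calc_eq_dir point "U" r (0, 1) (by decide) (fun st i => by simp [pvStep, sub_eq_add_neg])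
  by_cases hD : c = "D"
  · subst hD; exact calc_eq_dir point "D" r (0, -1) (by decide) (fun st i => by simp [pvStep, sub_eq_add_neg])
  -- unknown command: A appends nothing, B finds no delta
  · rcases point with ⟨x, y⟩
    simp only [calculate_move, calculate_move_alt, get_none_of_unknown c hR hL hU hD,
      hR, hL, hU, hD, if_false]
    induction (PySem.List.pyRange 0 r 1) with
    | nil => rfl
    | cons a t ih => simp only [List.foldl_cons]; exact ih
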